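-- pv_equiv track=rewrite | github.com/verycoolteam/-task-2-bignum-arithmetic | lab.py | mul_small
-- ===== SOURCE A (Python) =====
-- def normalize(num, M=None, N=None):
--     while len(num) > 1 and num[0] == 0:
--         num = num[1:]
--     return num
--
-- def mul_small(a, k, M, N=None):
--     if k == 0 or a == [0]:
--         return [0]
--     a = a[-N:]
--     res = [0] * (len(a) + 1)
--     carry = 0
--     for i in range(len(a) - 1, -1, -1):
--         prod = a[i] * k + carry
--         res[i + 1] = prod % M
--         carry = prod // M
--     res[0] = carry
--
--     res = res[-N:]
--     return normalize(res)
-- ===== SOURCE B (Python) =====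
-- def normalize(num, M=None, N=None):
--     while len(num) > 1 and num[0] == 0:
--         num = num[1:]
--     return num
--
-- def mul_small(a, k, M, N=None):
--     if k == 0 or a == [0]:
--         return [0]
--     a = a[-N:]
--     val = 0
--     for d in a:
--         val = val * M + d
--     val *= k
--     res = []
--     for _ in range(len(a)):
--         res = [val % M] + res
--         val //= M
--     res = [val] + res
--     res = res[-N:]
--     return normalize(res)
-- ===== Notes on version B (the rewrite author's own statement) =====
-- stated objective: alternative
-- what changed: Replaces A's per-digit multiply-with-carry loop writing into a preallocated result array with folding the digit array into a single integer (Horner), multiplying once, and rebuilding the digits front-to-back by repeated divmod with prepending.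
import Mathlib
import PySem

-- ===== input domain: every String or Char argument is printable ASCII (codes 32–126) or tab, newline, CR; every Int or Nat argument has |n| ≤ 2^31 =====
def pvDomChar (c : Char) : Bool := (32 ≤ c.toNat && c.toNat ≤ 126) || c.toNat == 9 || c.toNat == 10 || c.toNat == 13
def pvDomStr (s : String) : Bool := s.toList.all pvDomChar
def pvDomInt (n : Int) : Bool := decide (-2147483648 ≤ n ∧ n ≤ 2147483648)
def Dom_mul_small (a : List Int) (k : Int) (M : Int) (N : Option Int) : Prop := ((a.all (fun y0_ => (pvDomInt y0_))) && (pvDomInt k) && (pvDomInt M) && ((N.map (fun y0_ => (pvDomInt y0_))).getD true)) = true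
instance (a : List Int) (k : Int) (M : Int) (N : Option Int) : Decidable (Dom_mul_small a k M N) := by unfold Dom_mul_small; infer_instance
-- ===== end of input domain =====

-- B folds the digits into one integer (Horner), multiplies once, and rebuilds the result
-- front-to-back by repeated divmod with prepending (objective: alternative).

-- ===== PORT A =====
-- shared helper: Python `normalize` (drop leading zeros, keep at least one digit)
def pyNormalize : List Int → List Int
  | x :: y :: rest => if x = 0 then pyNormalize (y :: rest) else x :: y :: rest
  | l => l

def mul_small (a : List Int) (k : Int) (M : Int) (N : Option Int) : List Int :=
  if k = 0 ∨ a = [0] then [0]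
  else
    match N with
    | none => []  -- Python raises TypeError on `a[-None:]`; excluded by Pre_
    | some n =>
      let a' := PySem.List.slice a (some (-n)) none
      let st :=
        (PySem.List.pyRange ((a'.length : Int) - 1) (-1) (-1)).foldl
          (fun (st : List Int × Int) i =>
            let prod := (PySem.List.pyGet? a' i).getD 0 * k + st.2
            -- res[i+1] = prod % M ; here 1 ≤ i+1 ≤ len(a'), always in range
            (st.1.set (i + 1).toNat (PySem.Int.mod prod M), PySem.Int.floordiv prod M))
          (List.replicate (a'.length + 1) 0, 0)
      let res := st.1.set 0 st.2
      pyNormalize (PySem.List.slice res (some (-n)) none)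

-- ===== PORT B =====
-- `val = 0; for d in a: val = val*M + d` as a recursive Horner evaluation
def pyHorner (M : Int) (v : Int) : List Int → Int
  | [] => v
  | d :: rest => pyHorner M (v * M + d) rest

-- `for _ in range(n): res = [val % M] + res; val //= M` then `res = [val] + res`
def pyRebuild (M : Int) : Nat → Int → List Int → List Int
  | 0, v, res => v :: res
  | Nat.succ m, v, res => pyRebuild M m (PySem.Int.floordiv v M) (PySem.Int.mod v M :: res)

def mul_small_alt (a : List Int) (k : Int) (M : Int) (N : Option Int) : List Int :=
  if k = 0 ∨ a = [0] then [0]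
  else
    match N with
    | none => []  -- Python raises TypeError on `a[-None:]`
    | some n =>
      let a' := PySem.List.slice a (some (-n)) none
      pyNormalize
        (PySem.List.slice (pyRebuild M a'.length (pyHorner M 0 a' * k) []) (some (-n)) none)

-- ===== PRECONDITION & SPEC =====
-- Pre_ excludes only A's crashes: N = None (TypeError in `a[-N:]`) and M = 0 (ZeroDivisionError).
def Pre_mul_small (a : List Int) (k : Int) (M : Int) (N : Option Int) : Prop :=
  k = 0 ∨ a = [0] ∨ (N.isSome ∧ M ≠ 0)
instance (a : List Int) (k : Int) (M : Int) (N : Option Int) : Decidable (Pre_mul_small a k M N) := by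
  unfold Pre_mul_small; infer_instance

def pvWitness_mul_small : List Int × Int × Int × Option Int := ([1, 2], 3, 10, some 2)

def Spec_mul_small (a : List Int) (k : Int) (M : Int) (N : Option Int) (out : List Int) : Prop := out = mul_small_alt a k M N
instance (a : List Int) (k : Int) (M : Int) (N : Option Int) (out : List Int) : Decidable (Spec_mul_small a k M N out) := by unfold Spec_mul_small; infer_instance

-- ===== CLAIM (what is proved, stated in full; the proofs are below) =====
def Claim_equal_mul_small : Prop := ∀ (a : List Int) (k : Int) (M : Int) (N : Option Int), Dom_mul_small a k M N → Pre_mul_small a k M N → Spec_mul_small a k M N (mul_small a k M N)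

-- ===== LEMMAS AND PROOFS =====

-- carry chain of A's loop, as structural recursion over the digit list (rightmost digit last),
-- with incoming carry c at the right end; returns (carry out of the top, digit list)
def mulCarryFrom (k M : Int) (c : Int) : List Int → Int × List Int
  | [] => (c, [])
  | d :: rest =>
    let r := mulCarryFrom k M c rest
    let p := d * k + r.1
    (PySem.Int.floordiv p M, PySem.Int.mod p M :: r.2)

theorem mulCarryFrom_append_singleton (k M c d : Int) (l : List Int) :
    mulCarryFrom k M c (l ++ [d]) =
      ((mulCarryFrom k M (PySem.Int.floordiv (d * k + c) M) l).1,
       (mulCarryFrom k M (PySem.Int.floordiv (d * k + c) M) l).2 ++ [PySem.Int.mod (d * k + c) M]) := by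
  induction l with
  | nil => simp [mulCarryFrom]
  | cons x xs ih => simp [mulCarryFrom, ih]

theorem replicate_set_append (n : Nat) (x : Int) (tail : List Int) :
    (List.replicate (n + 1) (0 : Int) ++ tail).set n x = List.replicate n 0 ++ x :: tail := by
  induction n with
  | zero => simp
  | succ m ih => simpa [List.replicate_succ] using ih

-- A's loop, generalized: processing the indices of `pre` (inside a' = pre ++ suf) from the top down
theorem loopA_general (k M : Int) :
    ∀ (pre suf tail : List Int) (c : Int),
      (PySem.List.pyRange ((pre.length : Int) - 1) (-1) (-1)).foldl
          (fun (st : List Int × Int) i =>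
            let prod := (PySem.List.pyGet? (pre ++ suf) i).getD 0 * k + st.2
            (st.1.set (i + 1).toNat (PySem.Int.mod prod M), PySem.Int.floordiv prod M))
          (List.replicate (pre.length + 1) 0 ++ tail, c)
        = ((0 : Int) :: (mulCarryFrom k M c pre).2 ++ tail, (mulCarryFrom k M c pre).1) := by
  intro pre
  induction pre using List.reverseRecOn with
  | nil =>
    intro suf tail c
    rw [PySem.List.pyRange_neg_one_eq_nil (by norm_num)]
    simp [mulCarryFrom]
  | append_singleton l d ih =>
    intro suf tail c
    have hlen : ((l ++ [d]).length : Int) - 1 = (l.length : Int) := by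
      simp
    rw [hlen, PySem.List.pyRange_neg_one_cons (by omega)]
    rw [List.foldl_cons]
    have hget : PySem.List.pyGet? ((l ++ [d]) ++ suf) ((l.length : Int)) = some d := by
      rw [List.append_assoc, List.singleton_append]
      exact PySem.List.pyGet?_append_length l suf d
    have hlen2 : (l ++ [d]).length + 1 = (l.length + 1) + 1 := by simp
    have hto : (((l.length : Int)) + 1).toNat = l.length + 1 := by omega
    simp only [hget, Option.getD_some, hlen2, hto]
    rw [replicate_set_append (l.length + 1)]
    rw [List.append_assoc, List.singleton_append]
    rw [ih (d :: suf) (PySem.Int.mod (d * k + c) M :: tail) (PySem.Int.floordiv (d * k + c) M)]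
    rw [mulCarryFrom_append_singleton]
    simp

theorem pyHorner_append_singleton (M v d : Int) (l : List Int) :
    pyHorner M v (l ++ [d]) = pyHorner M v l * M + d := by
  induction l generalizing v with
  | nil => simp [pyHorner]
  | cons x xs ih => simp [pyHorner, ih]

-- B's divmod rebuild produces exactly A's carry chain: top carry followed by the digits
theorem rebuild_eq (k M : Int) (hM : M ≠ 0) :
    ∀ (l : List Int) (c : Int) (res : List Int),
      pyRebuild M l.length (pyHorner M 0 l * k + c) res
        = (mulCarryFrom k M c l).1 :: (mulCarryFrom k M c l).2 ++ res := by
  have hmod : ∀ x y : Int, PySem.Int.mod (y * M + x) M = PySem.Int.mod x M :=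
    fun x y => Int.mul_add_fmod_self_right y M x
  have hdiv : ∀ x y : Int, PySem.Int.floordiv (y * M + x) M = y + PySem.Int.floordiv x M :=
    fun x y => by
      show (y * M + x).fdiv M = y + x.fdiv M
      rw [add_comm, Int.add_mul_fdiv_right x y hM, add_comm]
  intro l
  induction l using List.reverseRecOn with
  | nil =>
    intro c res
    simp [pyHorner, pyRebuild, mulCarryFrom]
  | append_singleton l' d ih =>
    intro c res
    have hlen : (l' ++ [d]).length = l'.length + 1 := by simp
    have hv : pyHorner M 0 (l' ++ [d]) * k + c
        = (pyHorner M 0 l' * k) * M + (d * k + c) := by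
      rw [pyHorner_append_singleton]; ring
    rw [hlen, hv]
    show pyRebuild M l'.length _ _ = _
    rw [hmod, hdiv, ih (PySem.Int.floordiv (d * k + c) M)
      (PySem.Int.mod (d * k + c) M :: res), mulCarryFrom_append_singleton]
    simp

-- ===== VERDICT (by name: the statement is the Claim_ definition above) =====
theorem mul_small_spec : Claim_equal_mul_small := by
  intro a k M N hdom hpre
  unfold Spec_mul_small
  by_cases hg : k = 0 ∨ a = [0]
  · simp [mul_small, mul_small_alt, hg]
  · have hNM : N.isSome ∧ M ≠ 0 := by
      rcases hpre with h | h | h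
      · exact absurd (Or.inl h) hg
      · exact absurd (Or.inr h) hg
      · exact h
    obtain ⟨n, rfl⟩ := Option.isSome_iff_exists.mp hNM.1
    have hM := hNM.2
    simp only [mul_small, mul_small_alt, if_neg hg]
    have hA := loopA_general k M (PySem.List.slice a (some (-n)) none) [] [] 0
    simp only [List.append_nil] at hA
    have hB := rebuild_eq k M hM (PySem.List.slice a (some (-n)) none) 0 []
    rw [add_zero] at hB
    rw [hA, hB]
    simp
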